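-- pv_equiv track=rewrite | github.com/UPT-FAING-EPIS/proyecto-si885-2025-i-u2-grupo_hc_pc | scrap_pequeno.py | extract_unit_and_year_from_repo_name
-- ===== SOURCE A (Python) =====
-- def extract_unit_and_year_from_repo_name(repo_full_name):
--     """Extraer unidad y año del nombre completo del repositorio."""
--     # Formato esperado: UPT-FAING-EPIS/proyecto-si784-2024-i-u1
--     try:
--         parts = repo_full_name.split('/')[-1].split('-')
--         year = ""
--         unit = ""
--
--         # Buscar el año (formato 2024, 2023, etc.)
--         for part in parts:
--             if part.isdigit() and len(part) == 4 and part.startswith('20'):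
--                 year = part
--                 break
--
--         # Buscar la unidad (formato u1, u2, etc.)
--         for part in parts:
--             if part.startswith('u') and len(part) >= 2:
--                 unit = part
--                 break
--
--         return unit, year
--     except:
--         return "", ""
-- ===== SOURCE B (Python) =====
-- def extract_unit_and_year_from_repo_name(repo_full_name):
--     """Extraer unidad y año del nombre completo del repositorio."""
--     year = ""
--     unit = ""
--     for part in repo_full_name.split('/')[-1].split('-'):
--         if not year and part.isdigit() and len(part) == 4 and part.startswith('20'):
--             year = part
--         if not unit and part.startswith('u') and len(part) >= 2:
--             unit = part
--         if year and unit: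
--             break
--     return unit, year
-- ===== Notes on version B (the rewrite author's own statement) =====
-- stated objective: simpler
-- what changed: Replaces A's two sequential scans over the token list with a single fused loop that maintains both fields (each taking its first qualifying token) and stops early once both are found; the dead try/except is dropped since no operation can raise.
import Mathlib
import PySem

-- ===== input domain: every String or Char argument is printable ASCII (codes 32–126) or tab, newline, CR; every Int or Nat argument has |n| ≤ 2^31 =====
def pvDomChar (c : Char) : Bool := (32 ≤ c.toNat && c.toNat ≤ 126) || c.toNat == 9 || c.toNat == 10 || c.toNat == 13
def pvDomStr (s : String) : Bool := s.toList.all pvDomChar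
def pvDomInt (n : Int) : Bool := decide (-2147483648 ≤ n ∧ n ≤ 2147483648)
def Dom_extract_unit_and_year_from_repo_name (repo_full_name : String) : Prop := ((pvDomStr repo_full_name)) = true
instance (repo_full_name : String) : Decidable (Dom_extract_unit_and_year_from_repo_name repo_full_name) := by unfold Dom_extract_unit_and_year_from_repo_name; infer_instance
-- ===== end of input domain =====

-- B fuses A's two sequential first-match scans into one early-exiting loop maintaining both fields (objective: simpler).
-- A's try/except is dead code (split/indexing here cannot raise: split always yields a non-empty list), so A is total.

-- ===== PORT A =====
-- s.split(sep) with a nonempty literal sep: split? is always `some`, the [] default is unreachable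
def pvSplit (s sep : String) : List String := (PySem.Str.split? s sep).getD []

-- first loop: find the year ('20xx' 4-digit token), break on first match
def pvYearLoop : List String → String
  | [] => ""
  | p :: rest =>
    if PySem.Str.strIsdigit p && PySem.Str.len p == 4 && PySem.Str.startswith p "20" then p
    else pvYearLoop rest

-- second loop: find the unit (starts with 'u', length ≥ 2), break on first match
def pvUnitLoop : List String → String
  | [] => ""
  | p :: rest =>
    if PySem.Str.startswith p "u" && decide (2 ≤ PySem.Str.len p) then p
    else pvUnitLoop rest

def extract_unit_and_year_from_repo_name (repo_full_name : String) : String × String :=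
  -- split('/') is never empty, so the [-1] index is in range (pyGetD default unreachable)
  let parts := pvSplit (PySem.List.pyGetD (pvSplit repo_full_name "/") (-1) "") "-"
  let year := pvYearLoop parts
  let unit := pvUnitLoop parts
  (unit, year)

-- ===== PORT B =====
-- single loop carrying (year, unit); each field keeps its first qualifying token; break once both set
def pvFusedLoop : List String → String → String → String × String
  | [], year, unit => (unit, year)
  | p :: rest, year, unit =>
    let year := if year == "" && (PySem.Str.strIsdigit p && PySem.Str.len p == 4 && PySem.Str.startswith p "20") then p else year
    let unit := if unit == "" && (PySem.Str.startswith p "u" && decide (2 ≤ PySem.Str.len p)) then p else unit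
    if year != "" && unit != "" then (unit, year) else pvFusedLoop rest year unit

def extract_unit_and_year_from_repo_name_alt (repo_full_name : String) : String × String :=
  pvFusedLoop (pvSplit (PySem.List.pyGetD (pvSplit repo_full_name "/") (-1) "") "-") "" ""

-- ===== PRECONDITION & SPEC =====
def Spec_extract_unit_and_year_from_repo_name (repo_full_name : String) (out : String × String) : Prop := out = extract_unit_and_year_from_repo_name_alt repo_full_name
instance (repo_full_name : String) (out : String × String) : Decidable (Spec_extract_unit_and_year_from_repo_name repo_full_name out) := by unfold Spec_extract_unit_and_year_from_repo_name; infer_instance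

-- ===== CLAIM (what is proved, stated in full; the proofs are below) =====
def Claim_equal_extract_unit_and_year_from_repo_name : Prop := ∀ (repo_full_name : String), Dom_extract_unit_and_year_from_repo_name repo_full_name → Spec_extract_unit_and_year_from_repo_name repo_full_name (extract_unit_and_year_from_repo_name repo_full_name)

-- ===== LEMMAS AND PROOFS =====
-- a matched year token is nonempty (it has length 4)
theorem year_cond_ne (p : String)
    (h : (PySem.Str.strIsdigit p && PySem.Str.len p == 4 && PySem.Str.startswith p "20") = true) :
    (p == "") = false := by
  rcases h' : (p == "") with _ | _
  · rfl
  · exfalso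
    have hp : p = "" := eq_of_beq h'
    subst hp
    simp [PySem.Str.len] at h

-- a matched unit token is nonempty (it has length ≥ 2)
theorem unit_cond_ne (p : String)
    (h : (PySem.Str.startswith p "u" && decide (2 ≤ PySem.Str.len p)) = true) :
    (p == "") = false := by
  rcases h' : (p == "") with _ | _
  · rfl
  · exfalso
    have hp : p = "" := eq_of_beq h'
    subst hp
    simp [PySem.Str.len] at h

-- one field of the fused step equals the corresponding step of the independent scan
theorem field_step (y p q : String) (c : Bool) (hc : c = true → (p == "") = false) :
    (if (if (y == "" && c) = true then p else y) == "" then q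
     else (if (y == "" && c) = true then p else y))
      = if (y == "") = true then (if c = true then p else q) else y := by
  rcases h0 : (y == "") with _ | _
  · simp [h0]
  · rcases hcc : c with _ | _
    · simp [h0]
    · simp [hc hcc]

-- invariant: the fused loop computes exactly the two independent first-match scans
theorem pvFusedLoop_eq (l : List String) : ∀ (year unit : String),
    pvFusedLoop l year unit =
      ((if (unit == "") = true then pvUnitLoop l else unit),
       (if (year == "") = true then pvYearLoop l else year)) := by
  induction l with
  | nil => intro year unit; simp [pvFusedLoop, pvYearLoop, pvUnitLoop]
  | cons p rest ih =>
    intro year unit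
    simp only [pvFusedLoop]
    rw [ih]
    set Y := if (year == "" && (PySem.Str.strIsdigit p && PySem.Str.len p == 4 && PySem.Str.startswith p "20")) = true then p else year with hY
    set U := if (unit == "" && (PySem.Str.startswith p "u" && decide (2 ≤ PySem.Str.len p))) = true then p else unit with hU
    have hbr : (if (Y != "" && U != "") = true
          then (U, Y)
          else ((if (U == "") = true then pvUnitLoop rest else U),
                (if (Y == "") = true then pvYearLoop rest else Y)))
        = ((if (U == "") = true then pvUnitLoop rest else U),
           (if (Y == "") = true then pvYearLoop rest else Y)) := by
      by_cases hb : (Y != "" && U != "") = true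
      · obtain ⟨h1, h2⟩ : (Y == "") = false ∧ (U == "") = false := by
          simpa [bne] using hb
        simp [hb, h1, h2]
      · simp [hb]
    rw [hbr]
    refine Prod.ext ?_ ?_
    · simp only [pvUnitLoop, hU]
      exact field_step unit p (pvUnitLoop rest) _ (unit_cond_ne p)
    · simp only [pvYearLoop, hY]
      exact field_step year p (pvYearLoop rest) _ (year_cond_ne p)

-- ===== VERDICT (by name: the statement is the Claim_ definition above) =====
theorem extract_unit_and_year_from_repo_name_spec : Claim_equal_extract_unit_and_year_from_repo_name := by
  intro r _
  unfold Spec_extract_unit_and_year_from_repo_name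
  unfold extract_unit_and_year_from_repo_name extract_unit_and_year_from_repo_name_alt
  simp [pvFusedLoop_eq]
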